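-- pv_equiv track=rewrite | github.com/corentinlunel/corentinlunel.github.io | Final_entrelacs.py | mindouble
-- ===== SOURCE A (Python) =====
-- def mindouble(l):
--
--     """couple du minimum de chacun des couples de l"""
--
--     c,d = l[0]
--     for i in l :
--         a,b = i
--         if a < c :
--             c = a
--         if b < d :
--             d = b
--     return c,d
-- ===== SOURCE B (Python) =====
-- def mindouble(l):
--     """couple du minimum de chacun des couples de l"""
--     return (min(p[0] for p in l), min(p[1] for p in l))
-- ===== Notes on version B (the rewrite author's own statement) =====
-- stated objective: idiomatic
-- what changed: Replaces the single fused loop with two running minima by two independent built-in min passes over the first and second components.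
import Mathlib
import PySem

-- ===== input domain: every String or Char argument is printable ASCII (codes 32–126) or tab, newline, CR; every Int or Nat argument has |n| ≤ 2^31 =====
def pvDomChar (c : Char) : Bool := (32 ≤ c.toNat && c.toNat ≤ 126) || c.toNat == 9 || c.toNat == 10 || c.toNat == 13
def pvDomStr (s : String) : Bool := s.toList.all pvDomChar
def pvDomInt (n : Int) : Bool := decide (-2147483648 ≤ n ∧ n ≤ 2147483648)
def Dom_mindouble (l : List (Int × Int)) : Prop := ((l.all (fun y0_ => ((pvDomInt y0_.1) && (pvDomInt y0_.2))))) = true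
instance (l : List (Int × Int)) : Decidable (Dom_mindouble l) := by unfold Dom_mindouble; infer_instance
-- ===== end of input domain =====

-- B replaces A's single fused minimum loop with two independent built-in min passes over the projected components (idiomatic, same cost).


-- ===== PORT A =====
-- literal port of A: one fused loop carrying both running minima, seeded at l[0]
def mindouble (l : List (Int × Int)) : Int × Int :=
  match l with
  | [] => (0, 0)   -- A raises IndexError on []; excluded by Pre_mindouble
  | (c, d) :: _ =>
    l.foldl (fun cd i =>
      let c' := if i.1 < cd.1 then i.1 else cd.1
      let d' := if i.2 < cd.2 then i.2 else cd.2
      (c', d')) (c, d)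

-- ===== PORT B =====
-- port of B: two independent min passes over the projected components
def mindouble_alt (l : List (Int × Int)) : Int × Int :=
  ((PySem.List.min? (l.map Prod.fst) (fun x => x)).getD 0,
   (PySem.List.min? (l.map Prod.snd) (fun x => x)).getD 0)

-- ===== PRECONDITION & SPEC =====
-- A raises IndexError on the empty list (l[0]); B raises ValueError there (min of empty).
def Pre_mindouble (l : List (Int × Int)) : Prop := l ≠ []
instance (l : List (Int × Int)) : Decidable (Pre_mindouble l) := by unfold Pre_mindouble; infer_instance
def pvWitness_mindouble : (List (Int × Int)) := [(3, -1), (2, 7)]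
def Spec_mindouble (l : List (Int × Int)) (out : Int × Int) : Prop := out = mindouble_alt l
instance (l : List (Int × Int)) (out : Int × Int) : Decidable (Spec_mindouble l out) := by unfold Spec_mindouble; infer_instance

-- ===== CLAIM (what is proved, stated in full; the proofs are below) =====
def Claim_equal_mindouble : Prop := ∀ (l : List (Int × Int)), Dom_mindouble l → Pre_mindouble l → Spec_mindouble l (mindouble l)

-- ===== LEMMAS AND PROOFS =====

lemma fused_foldl_eq (t : List (Int × Int)) (c d : Int) :
    t.foldl (fun cd i =>
      let c' := if i.1 < cd.1 then i.1 else cd.1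
      let d' := if i.2 < cd.2 then i.2 else cd.2
      (c', d')) (c, d)
    = ((t.map Prod.fst).foldl min c, (t.map Prod.snd).foldl min d) := by
  induction t generalizing c d with
  | nil => simp
  | cons p t ih =>
      simp only [List.foldl_cons, List.map_cons, ih]
      congr 1 <;> congr 1 <;> simp [min_def] <;> omega

-- ===== VERDICT (by name: the statement is the Claim_ definition above) =====
theorem mindouble_spec : Claim_equal_mindouble := by
  intro l _ hpre
  unfold Spec_mindouble mindouble mindouble_alt
  match l with
  | [] => exact absurd rfl hpre
  | (c, d) :: t =>
      simp only [List.foldl_cons, fused_foldl_eq, List.map_cons,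
        PySem.List.min?_id_cons, Option.getD_some]
      congr 1 <;> simp
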